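-- pv_equiv track=rewrite | github.com/marrsia/nlp2022 | practical_1/practical_1.py | distinct_words
-- ===== SOURCE A (Python) =====
-- def distinct_words(corpus):
--     """ Determine a list of distinct words for the corpus.
--         Params:
--             corpus (list of list of strings): corpus of documents
--         Return:
--             corpus_words (list of strings): list of distinct words across the
--             corpus, sorted (using python 'sorted' function)
--             num_corpus_words (integer): number of distinct words across the
--             corpus
--     """
--     corpus_words = []
--     num_corpus_words = -1
--     # ------------------
--     # Write your implementation here.
--     words_set = set()
--     for doc in corpus:
--         for word in doc:
--             words_set.add(word)
--     corpus_words = sorted(list(words_set))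
--     corpus_words.sort()
--     num_corpus_words = len(corpus_words)
--     # ------------------
--
--     return corpus_words, num_corpus_words
-- ===== SOURCE B (Python) =====
-- def distinct_words(corpus):
--     # Alternative strategy: flatten everything, sort globally, dedup adjacent
--     # duplicates in one pass (no set is built).
--     all_words = []
--     for doc in corpus:
--         all_words.extend(doc)
--     all_words = sorted(all_words)
--     corpus_words = []
--     for w in all_words:
--         if not corpus_words or w != corpus_words[-1]:
--             corpus_words.append(w)
--     return corpus_words, len(corpus_words)
-- ===== Notes on version B (the rewrite author's own statement) =====
-- stated objective: alternative
-- what changed: B builds no set: it flattens the corpus into one list of all tokens, sorts that whole list, and removes adjacent duplicates in a single pass, instead of accumulating a hash set and sorting its elements.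
import Mathlib
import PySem

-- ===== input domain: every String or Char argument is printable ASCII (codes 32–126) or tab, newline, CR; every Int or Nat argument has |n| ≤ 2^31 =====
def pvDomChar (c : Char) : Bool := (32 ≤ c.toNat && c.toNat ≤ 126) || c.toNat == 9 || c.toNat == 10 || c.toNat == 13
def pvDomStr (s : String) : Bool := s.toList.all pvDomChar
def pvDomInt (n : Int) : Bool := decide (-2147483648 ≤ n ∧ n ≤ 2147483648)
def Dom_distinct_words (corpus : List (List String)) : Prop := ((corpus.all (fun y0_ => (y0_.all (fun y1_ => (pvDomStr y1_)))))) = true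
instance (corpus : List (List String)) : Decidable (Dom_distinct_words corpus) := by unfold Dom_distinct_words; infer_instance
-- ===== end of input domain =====

-- B builds no set: it flattens the corpus, sorts the full token list, and removes adjacent duplicates in one pass.


-- ===== PORT A =====
-- literal port of A: build a set by nested loops of set.add, then sorted(), then .sort()
def distinct_words (corpus : List (List String)) : List String × Int :=
  let words_set : PySem.Set String :=
    corpus.foldl (fun s doc => doc.foldl (fun s w => PySem.Set.add s w) s) PySem.Set.empty
  let corpus_words := PySem.List.sorted words_set (fun x => x) false
  let corpus_words := PySem.List.sorted corpus_words (fun x => x) false  -- corpus_words.sort()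
  (corpus_words, (corpus_words.length : Int))

-- ===== PORT B =====
-- literal port of B: flatten (extend loop), sort everything, adjacent-dedup loop
def distinct_words_alt (corpus : List (List String)) : List String × Int :=
  let all_words := corpus.foldl (fun acc doc => acc ++ doc) []
  let all_words := PySem.List.sorted all_words (fun x => x) false
  let corpus_words :=
    all_words.foldl (fun acc w => if acc.getLast? = some w then acc else acc ++ [w]) []
  (corpus_words, (corpus_words.length : Int))

-- ===== PRECONDITION & SPEC =====
def Spec_distinct_words (corpus : List (List String)) (out : List String × Int) : Prop := out = distinct_words_alt corpus
instance (corpus : List (List String)) (out : List String × Int) : Decidable (Spec_distinct_words corpus out) := by unfold Spec_distinct_words; infer_instance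

-- ===== CLAIM (what is proved, stated in full; the proofs are below) =====
def Claim_equal_distinct_words : Prop := ∀ (corpus : List (List String)), Dom_distinct_words corpus → Spec_distinct_words corpus (distinct_words corpus)

-- ===== LEMMAS AND PROOFS =====

-- A's nested add-loops build set(flatten corpus)
lemma aSet_eq_ofList_flatten (corpus : List (List String)) (s0 : PySem.Set String) :
    corpus.foldl (fun s doc => doc.foldl (fun s w => PySem.Set.add s w) s) s0
      = PySem.Set.update s0 corpus.flatten := by
  induction corpus generalizing s0 with
  | nil => simp [PySem.Set.update]
  | cons d t ih =>
      simp only [List.foldl_cons, List.flatten_cons, ih, PySem.Set.update_append]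
      rfl

-- in a strictly increasing list, every element is ≤ the last one
lemma le_getLast_of_pairwise_lt {l : List String} (hp : l.Pairwise (· < ·))
    {x p : String} (hx : x ∈ l) (hl : l.getLast? = some p) : x ≤ p := by
  induction l with
  | nil => cases hx
  | cons a t ih =>
      cases t with
      | nil =>
          simp at hx hl; simp [hx, hl]
      | cons b u =>
          rw [List.getLast?_cons_cons] at hl
          rcases List.mem_cons.mp hx with rfl | hx'
          · have hpmem : p ∈ b :: u := List.mem_of_getLast? hl
            exact le_of_lt ((List.pairwise_cons.mp hp).1 p hpmem)
          · exact ih (List.pairwise_cons.mp hp).2 hx' hl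

-- invariant of B's adjacent-dedup fold over a (≤)-sorted list
lemma dedup_fold_inv (l : List String) (acc : List String)
    (hl : l.Pairwise (· ≤ ·)) (hacc : acc.Pairwise (· < ·))
    (hlast : ∀ p, acc.getLast? = some p → ∀ w ∈ l, p ≤ w) :
    (l.foldl (fun acc w => if acc.getLast? = some w then acc else acc ++ [w]) acc).Pairwise (· < ·)
    ∧ ∀ x, x ∈ l.foldl (fun acc w => if acc.getLast? = some w then acc else acc ++ [w]) acc
           ↔ x ∈ acc ∨ x ∈ l := by
  induction l generalizing acc with
  | nil => exact ⟨hacc, fun x => by simp⟩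
  | cons w t ih =>
      obtain ⟨hw, ht⟩ := List.pairwise_cons.mp hl
      simp only [List.foldl_cons]
      by_cases hcase : acc.getLast? = some w
      · rw [if_pos hcase]
        have hwmem : w ∈ acc := List.mem_of_getLast? hcase
        obtain ⟨h1, h2⟩ := ih acc ht hacc
          (by intro p hp y hy; have := hlast p hp y (List.mem_cons_of_mem _ hy); exact this)
        refine ⟨h1, fun x => ?_⟩
        rw [h2 x]
        constructor
        · rintro (h | h)
          · exact Or.inl h
          · exact Or.inr (List.mem_cons_of_mem _ h)
        · rintro (h | h)
          · exact Or.inl h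
          · rcases List.mem_cons.mp h with rfl | h'
            · exact Or.inl hwmem
            · exact Or.inr h'
      · rw [if_neg hcase]
        have haccw : (acc ++ [w]).Pairwise (· < ·) := by
          rw [List.pairwise_append]
          refine ⟨hacc, List.pairwise_singleton _ _, ?_⟩
          intro x hx y hy
          rw [List.mem_singleton.mp hy]
          cases hq : acc.getLast? with
          | none => simp [List.getLast?_eq_none_iff.mp hq] at hx
          | some p =>
              have hxp : x ≤ p := le_getLast_of_pairwise_lt hacc hx hq
              have hpw : p ≤ w := hlast p hq w (List.mem_cons_self)
              have hne : p ≠ w := fun h => hcase (h ▸ hq)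
              exact lt_of_le_of_lt hxp (lt_of_le_of_ne hpw hne)
        obtain ⟨h1, h2⟩ := ih (acc ++ [w]) ht haccw
          (by
            intro p hp y hy
            rw [List.getLast?_append_cons, List.getLast?_singleton] at hp
            cases hp
            exact hw y hy)
        refine ⟨h1, fun x => ?_⟩
        rw [h2 x]
        simp only [List.mem_append, List.mem_cons]
        tauto

-- core: adjacent-dedup of sorted(all tokens) = sorted(set(all tokens))
lemma dedup_sorted_eq_sorted_ofList (xs : List String) :
    PySem.List.sorted (PySem.Set.ofList xs) (fun x => x) false
      = (PySem.List.sorted xs (fun x => x) false).foldl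
          (fun acc w => if acc.getLast? = some w then acc else acc ++ [w]) [] := by
  set s := PySem.List.sorted xs (fun x => x) false with hs
  have hps : s.Pairwise (· ≤ ·) := PySem.List.sorted_pairwise xs (fun x => x)
  obtain ⟨hpw, hmem⟩ := dedup_fold_inv s [] hps (List.Pairwise.nil) (by simp)
  apply PySem.List.sorted_eq_of_perm_of_pairwise_lt
  · have hnd : (s.foldl (fun acc w => if acc.getLast? = some w then acc else acc ++ [w]) []).Nodup :=
      (hpw.imp (fun h => ne_of_lt h))
    rw [List.perm_ext_iff_of_nodup hnd (PySem.Set.nodup_ofList xs)]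
    intro a
    rw [hmem a, PySem.Set.mem_ofList]
    simp [hs, PySem.List.mem_sorted]
  · exact hpw

theorem distinct_words_eq (corpus : List (List String)) :
    distinct_words corpus = distinct_words_alt corpus := by
  unfold distinct_words distinct_words_alt
  simp only [aSet_eq_ofList_flatten, PySem.Set.update_empty,
    PySem.List.foldl_append_eq_flatten, List.nil_append, PySem.List.sorted_sorted]
  rw [dedup_sorted_eq_sorted_ofList]

-- ===== VERDICT (by name: the statement is the Claim_ definition above) =====
theorem distinct_words_spec : Claim_equal_distinct_words := by
  intro corpus _
  unfold Spec_distinct_words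
  exact distinct_words_eq corpus
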